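-- pv_equiv track=rewrite | github.com/omnetpp/omnetpp | test/scave/charttool/tester.py | compressDiff
-- ===== SOURCE A (Python) =====
-- def compressOneDiff(tmpDiff, maxLines):
--     if len(tmpDiff) <= 2 * maxLines + 3:
--         return tmpDiff
--     pre = tmpDiff[0][0]
--     return tmpDiff[:maxLines] \
--             + [ pre + ".\n", pre + ". <snip>\n", pre + ".\n"] \
--             + tmpDiff[-maxLines:]
--
-- def compressDiff(diff):
--     maxLines = 3
--     tmpDiff = []
--     prevStart = ''
--     for line in diff:
--         if prevStart == line[0:2]:
--             tmpDiff.append(line)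
--         else:
--             for l in compressOneDiff(tmpDiff, maxLines):
--                 yield l
--             prevStart = line[0:2]
--             tmpDiff = [line]
--
--     for l in compressOneDiff(tmpDiff, maxLines):
--         yield l
-- ===== SOURCE B (Python) =====
-- def compressDiff(diff):
--     # Index-based: compute the boundary positions of the prefix runs first,
--     # then emit each half-open index range by slicing, snipping long ranges inline.
--     n = len(diff)
--     bounds = [i for i in range(n) if i == 0 or diff[i][0:2] != diff[i - 1][0:2]] + [n]
--     for s, e in zip(bounds, bounds[1:]):
--         if e - s <= 9:
--             yield from diff[s:e]
--         else:
--             p = diff[s][0]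
--             yield from diff[s:s + 3]
--             yield p + ".\n"
--             yield p + ". <snip>\n"
--             yield p + ".\n"
--             yield from diff[e - 3:e]
-- ===== Notes on version B (the rewrite author's own statement) =====
-- stated objective: alternative
-- what changed: B drops A's streaming prevStart/tmpDiff state machine and group lists entirely: it first computes the list of run-boundary indices with a comprehension over range(n), then emits each half-open index range by slicing the original list, with the snip logic inlined per range instead of the compressOneDiff helper.
import Mathlib
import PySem

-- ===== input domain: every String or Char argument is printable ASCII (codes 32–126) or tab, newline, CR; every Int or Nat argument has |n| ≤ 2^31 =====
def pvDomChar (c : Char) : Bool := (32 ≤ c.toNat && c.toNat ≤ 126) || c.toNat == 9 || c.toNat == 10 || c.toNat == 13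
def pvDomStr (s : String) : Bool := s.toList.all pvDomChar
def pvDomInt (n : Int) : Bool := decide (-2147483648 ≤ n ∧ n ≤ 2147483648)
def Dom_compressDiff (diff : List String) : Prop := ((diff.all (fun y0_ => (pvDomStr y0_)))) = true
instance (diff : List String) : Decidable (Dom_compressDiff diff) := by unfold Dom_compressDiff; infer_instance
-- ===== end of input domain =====

-- B replaces A's streaming prevStart/tmpDiff state machine by an index-based
-- alternative: compute the run-boundary positions first, then emit each index
-- range by slicing, with the snip inlined (objective: alternative decomposition).
-- Both are generators in Python; the ports collect the yielded lines into a list.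

-- ===== PORT A =====
-- line[0:2] (the grouping key)
def keyOf (line : String) : String := PySem.Str.slice line (some 0) (some 2)

-- compressOneDiff(tmpDiff, 3) of A (maxLines is always 3).
-- tmpDiff[0][0] raises in Python when tmpDiff[0] = '' (only reachable outside Pre_);
-- the port takes a default there.  tmpDiff[:3] = take 3, tmpDiff[-3:] = drop (len-3)
-- (exact: in the branch taken, len > 9).
def snipOne (tmpDiff : List String) : List String :=
  if tmpDiff.length ≤ 2 * 3 + 3 then tmpDiff
  else
    let pre := (tmpDiff.headD "").toList.headD ' '
    tmpDiff.take 3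
      ++ [String.ofList [pre] ++ ".\n", String.ofList [pre] ++ ". <snip>\n", String.ofList [pre] ++ ".\n"]
      ++ tmpDiff.drop (tmpDiff.length - 3)

-- A's for-loop: state (prevStart, tmpDiff); yields become list appends, with the trailing flush
def loopA (prevStart : String) (tmpDiff : List String) : List String → List String
  | [] => snipOne tmpDiff
  | line :: rest =>
      if prevStart = keyOf line then loopA prevStart (tmpDiff ++ [line]) rest
      else snipOne tmpDiff ++ loopA (keyOf line) [line] rest

def compressDiff (diff : List String) : List String := loopA "" [] diff

-- ===== PORT B =====
-- Source B: bounds = [i for i in range(n) if i == 0 or diff[i][0:2] != diff[i-1][0:2]] + [n]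
-- (diff[i], diff[i-1] are always in range there, so getD with a dummy default is exact)
def boundsB (diff : List String) : List Nat :=
  (List.range diff.length).filter
    (fun i => i == 0 || keyOf (diff.getD i "") != keyOf (diff.getD (i - 1) ""))
  ++ [diff.length]

-- the body of Source B's for-loop over zip(bounds, bounds[1:]); diff[s:e] with
-- 0 ≤ s ≤ e ≤ n is (drop s).take (e-s); diff[s][0] defaults when diff[s] = ''
-- (only reachable outside Pre_)
def emitB (diff : List String) (se : Nat × Nat) : List String :=
  if se.2 - se.1 ≤ 9 then (diff.drop se.1).take (se.2 - se.1)
  else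
    let p := (diff.getD se.1 "").toList.headD ' '
    (diff.drop se.1).take 3
      ++ [String.ofList [p] ++ ".\n", String.ofList [p] ++ ". <snip>\n", String.ofList [p] ++ ".\n"]
      ++ (diff.drop (se.2 - 3)).take 3

def compressDiff_alt (diff : List String) : List String :=
  ((boundsB diff).zip (boundsB diff).tail).flatMap (emitB diff)

-- ===== PRECONDITION & SPEC =====
-- Pre_ excludes exactly the inputs on which Python A raises (IndexError: a run of
-- ≥ 10 lines whose first is '', i.e. 10 consecutive empty lines — only an empty
-- line has the empty two-character prefix); B raises there too.
def Pre_compressDiff (diff : List String) : Prop :=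
  ¬ (List.replicate 10 "").IsInfix diff
instance (diff : List String) : Decidable (Pre_compressDiff diff) := by
  unfold Pre_compressDiff; infer_instance

def pvWitness_compressDiff : List String :=
  ["+a\n", "+b\n", "+c\n", "+d\n", "-x\n", "  y\n"]

def Spec_compressDiff (diff : List String) (out : List String) : Prop := out = compressDiff_alt diff
instance (diff : List String) (out : List String) : Decidable (Spec_compressDiff diff out) := by unfold Spec_compressDiff; infer_instance

-- ===== CLAIM (what is proved, stated in full; the proofs are below) =====
def Claim_equal_compressDiff : Prop := ∀ (diff : List String), Dom_compressDiff diff → Pre_compressDiff diff → Spec_compressDiff diff (compressDiff diff)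

-- ===== LEMMAS AND PROOFS =====

-- canonical run decomposition (proof-only intermediate): group consecutive lines
-- with equal keyOf, built back to front
def runs : List String → List (List String)
  | [] => []
  | x :: xs =>
      match runs xs with
      | [] => [[x]]
      | g :: gs => if keyOf x = keyOf (g.headD "") then (x :: g) :: gs else [x] :: g :: gs

-- how A's loop folds the runs of the remaining input onto its (prev, tmp) state
def mergeRuns (prev : String) (tmp : List String) : List (List String) → List String
  | [] => snipOne tmp
  | g :: gs =>
      if keyOf (g.headD "") = prev then snipOne (tmp ++ g) ++ gs.flatMap snipOne
      else snipOne tmp ++ (g :: gs).flatMap snipOne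

theorem runs_shape (x : String) (xs : List String) :
    ∃ g gs, runs (x :: xs) = (x :: g) :: gs := by
  cases h : runs xs with
  | nil => exact ⟨[], [], by simp [runs, h]⟩
  | cons g gs =>
      by_cases hk : keyOf x = keyOf (g.head?.getD "")
      · exact ⟨g, gs, by rw [runs, h]; simp [hk]⟩
      · exact ⟨[], g :: gs, by rw [runs, h]; simp [hk]⟩

theorem snipOne_nil : snipOne [] = [] := by decide

theorem loopA_eq_mergeRuns :
    ∀ (l : List String) (prev : String) (tmp : List String),
      loopA prev tmp l = mergeRuns prev tmp (runs l) := by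
  intro l
  induction l with
  | nil => intro prev tmp; simp [loopA, runs, mergeRuns]
  | cons x xs ih =>
      intro prev tmp
      cases xs with
      | nil =>
          by_cases hp : prev = keyOf x <;>
            simp [loopA, runs, mergeRuns, hp, eq_comm (a := keyOf x)]
      | cons y ys =>
          obtain ⟨g', gs', hr⟩ := runs_shape y ys
          by_cases hp : prev = keyOf x <;> by_cases hk : keyOf x = keyOf y
          · have h1 : runs (x :: y :: ys) = (x :: y :: g') :: gs' := by
              rw [runs, hr]; simp [hk]
            rw [loopA, if_pos hp, ih, hr, h1]
            simp [mergeRuns, hp, hk]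
          · have h1 : runs (x :: y :: ys) = [x] :: (y :: g') :: gs' := by
              rw [runs, hr]; simp [hk]
            rw [loopA, if_pos hp, ih, hr, h1]
            have hyx : ¬ keyOf y = keyOf x := fun h => hk h.symm
            simp [mergeRuns, hp, hyx]
          · have h1 : runs (x :: y :: ys) = (x :: y :: g') :: gs' := by
              rw [runs, hr]; simp [hk]
            rw [loopA, if_neg hp, ih, hr, h1]
            have hxp : ¬ keyOf x = prev := fun h => hp h.symm
            have hyp : keyOf y = keyOf x := hk.symm
            simp [mergeRuns, hxp, hyp, List.flatMap]
          · have h1 : runs (x :: y :: ys) = [x] :: (y :: g') :: gs' := by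
              rw [runs, hr]; simp [hk]
            rw [loopA, if_neg hp, ih, hr, h1]
            have hxp : ¬ keyOf x = prev := fun h => hp h.symm
            have hyx : ¬ keyOf y = keyOf x := fun h => hk h.symm
            simp [mergeRuns, hxp, hyx, List.flatMap]

theorem a_eq_runs (diff : List String) :
    compressDiff diff = (runs diff).flatMap snipOne := by
  unfold compressDiff
  rw [loopA_eq_mergeRuns]
  cases h : runs diff with
  | nil => simp [mergeRuns, snipOne_nil]
  | cons g gs =>
      by_cases hk : keyOf (g.headD "") = ""
      · simp [mergeRuns, snipOne_nil, List.flatMap]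
      · simp [mergeRuns, snipOne_nil, List.flatMap]

-- front characterization of runs: head run = takeWhile, rest = dropWhile
theorem runs_cons_decomp (x : String) (xs : List String) :
    runs (x :: xs)
      = (x :: xs.takeWhile (fun y => keyOf y == keyOf x))
        :: runs (xs.dropWhile (fun y => keyOf y == keyOf x)) := by
  induction xs generalizing x with
  | nil => simp [runs]
  | cons y ys ih =>
      by_cases hk : keyOf y = keyOf x
      · have hpe : (fun z => keyOf z == keyOf x) = (fun z => keyOf z == keyOf y) := by
          funext z; rw [hk]
        rw [runs, ih y,
            List.takeWhile_cons_of_pos (by simpa using hk),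
            List.dropWhile_cons_of_pos (by simpa using hk), hpe]
        simp [hk.symm]
      · obtain ⟨g, gs, hr⟩ := runs_shape y ys
        have hx : ¬ keyOf x = keyOf y := fun h => hk h.symm
        rw [runs, hr,
            List.takeWhile_cons_of_neg (by simpa using hk),
            List.dropWhile_cons_of_neg (by simpa using hk), hr]
        simp [hx]

-- every element of the head run has key keyOf x
theorem key_of_headRun (x : String) (xs : List String) (y : String)
    (hy : y ∈ x :: xs.takeWhile (fun z => keyOf z == keyOf x)) : keyOf y = keyOf x := by
  rcases List.mem_cons.mp hy with rfl | hy
  · rfl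
  · have h2 := List.mem_takeWhile_imp (p := fun z => keyOf z == keyOf x) hy
    simpa using h2

theorem dropWhile_head_key (x : String) : ∀ (xs : List String) (h : String) (t : List String),
    xs.dropWhile (fun z => keyOf z == keyOf x) = h :: t → ¬ keyOf h = keyOf x := by
  intro xs
  induction xs with
  | nil => intro h t hd; simp [List.dropWhile] at hd
  | cons z zs ih =>
      intro h t hd
      by_cases hz : keyOf z = keyOf x
      · rw [List.dropWhile_cons_of_pos (by simpa using hz)] at hd
        exact ih h t hd
      · rw [List.dropWhile_cons_of_neg (by simpa using hz)] at hd
        cases hd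
        exact hz

-- getD of an in-range index is a member
theorem getD_mem (l : List String) (i : Nat) (h : i < l.length) : l.getD i "" ∈ l := by
  rw [List.getD_eq_getElem l "" h]
  exact List.getElem_mem h

-- the boundary-index list of g ++ rest, for g the maximal head run
theorem boundsB_decomp (g rest : List String) (hg : g ≠ [])
    (hkey : ∀ y ∈ g, keyOf y = keyOf (g.headD ""))
    (hbd : ∀ h t, rest = h :: t → ¬ keyOf h = keyOf (g.headD "")) :
    boundsB (g ++ rest) = 0 :: (boundsB rest).map (· + g.length) := by
  unfold boundsB
  have hL1 : 1 ≤ g.length := List.length_pos_iff.mpr hg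
  have hlen : (g ++ rest).length = g.length + rest.length := by simp
  have hka : ∀ i, i < g.length → keyOf ((g ++ rest).getD i "") = keyOf (g.headD "") := by
    intro i hi
    rw [List.getD_append g rest "" i hi]
    exact hkey _ (getD_mem g i hi)
  rw [hlen, List.range_add, List.filter_append]
  have part1 :
      (List.range g.length).filter
        (fun i => i == 0 || keyOf ((g ++ rest).getD i "") != keyOf ((g ++ rest).getD (i - 1) ""))
        = [0] := by
    have hcong : ∀ i ∈ List.range g.length,
        (i == 0 || keyOf ((g ++ rest).getD i "") != keyOf ((g ++ rest).getD (i - 1) ""))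
        = (i == 0) := by
      intro i hi
      have hiL : i < g.length := List.mem_range.mp hi
      rcases Nat.eq_zero_or_pos i with h0 | hpos
      · simp [h0]
      · rw [hka i hiL, hka (i - 1) (by omega)]
        simp

    rw [List.filter_congr hcong]
    obtain ⟨k, hk⟩ : ∃ k, g.length = k + 1 := ⟨g.length - 1, by omega⟩
    rw [hk, List.range_succ_eq_map]
    simp
  have part2 :
      ((List.range rest.length).map (g.length + ·)).filter
        (fun i => i == 0 || keyOf ((g ++ rest).getD i "") != keyOf ((g ++ rest).getD (i - 1) ""))
        = ((List.range rest.length).filter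
            (fun j => j == 0 || keyOf (rest.getD j "") != keyOf (rest.getD (j - 1) ""))).map (· + g.length) := by
    rw [List.filter_map]
    have hcong : ∀ j ∈ List.range rest.length,
        ((fun i => i == 0 || keyOf ((g ++ rest).getD i "") != keyOf ((g ++ rest).getD (i - 1) "")) ∘ (g.length + ·)) j
        = (j == 0 || keyOf (rest.getD j "") != keyOf (rest.getD (j - 1) "")) := by
      intro j hj
      have hjm : j < rest.length := List.mem_range.mp hj
      simp only [Function.comp]
      have hgr : (g ++ rest).getD (g.length + j) "" = rest.getD j "" := by
        rw [List.getD_append_right g rest "" (g.length + j) (by omega)]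
        congr 1
        omega
      rcases Nat.eq_zero_or_pos j with h0 | hpos
      · subst h0
        obtain ⟨h, t, rfl⟩ : ∃ h t, rest = h :: t := by
          cases rest with
          | nil => simp at hjm
          | cons h t => exact ⟨h, t, rfl⟩
        have hne : ¬ keyOf h = keyOf (g.headD "") := hbd h t rfl
        have e1 : (g ++ h :: t).getD (g.length + 0) "" = h := by
          rw [show g.length + 0 = g.length + (0:Nat) from rfl, hgr]
          rfl
        have e2 : keyOf ((g ++ h :: t).getD (g.length + 0 - 1) "") = keyOf (g.headD "") := by
          rw [show g.length + 0 - 1 = g.length - 1 by omega]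
          exact hka (g.length - 1) (by omega)
        rw [e1, e2]
        have c1 : (keyOf h != keyOf (g.headD "")) = true := by simpa using hne
        rw [c1]
        simp
      · have e2 : (g ++ rest).getD (g.length + j - 1) "" = rest.getD (j - 1) "" := by
          rw [show g.length + j - 1 = g.length + (j - 1) by omega]
          rw [List.getD_append_right g rest "" (g.length + (j - 1)) (by omega)]
          congr 1
          omega
        rw [hgr, e2]
        have c1 : (g.length + j == 0) = false := by simp; omega
        have c2 : (j == 0) = false := by simp; omega
        rw [c1, c2]
    rw [List.filter_congr hcong]
    exact List.map_congr_left fun a _ => by omega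
  rw [part1, part2]
  have : g.length + rest.length = rest.length + g.length := by omega
  rw [this]
  simp [List.map_append]

-- head of boundsB is always 0
theorem boundsB_head (rest : List String) : ∃ t, boundsB rest = 0 :: t := by
  cases rest with
  | nil => exact ⟨[], rfl⟩
  | cons h r =>
      unfold boundsB
      rw [show (h :: r).length = r.length + 1 from rfl, List.range_succ_eq_map]
      simp

-- emitting a shifted pair over g ++ rest is emitting the pair over rest
theorem emitB_shift (g rest : List String) (s e : Nat) :
    emitB (g ++ rest) (s + g.length, e + g.length) = emitB rest (s, e) := by
  unfold emitB
  have h1 : e + g.length - (s + g.length) = e - s := by omega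
  have h2 : (g ++ rest).drop (s + g.length) = rest.drop s := by
    rw [List.drop_append, List.drop_eq_nil_of_le (by omega : g.length ≤ s + g.length),
        show s + g.length - g.length = s by omega, List.nil_append]
  have h3 : (g ++ rest).getD (s + g.length) "" = rest.getD s "" := by
    simp [List.getD, List.getElem?_append_right (by omega : g.length ≤ s + g.length),
      show s + g.length - g.length = s by omega]
  by_cases h : e - s ≤ 9
  · simp only [h1, h2, if_pos h]
  · have he3 : 3 ≤ e := by omega
    have h4 : (g ++ rest).drop (e + g.length - 3) = rest.drop (e - 3) := by
      rw [List.drop_append, List.drop_eq_nil_of_le (by omega : g.length ≤ e + g.length - 3),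
          show e + g.length - 3 - g.length = e - 3 by omega, List.nil_append]
    simp only [h1, h2, h3, h4, if_neg h]

-- emitting the head pair (0, g.length) over g ++ rest is snipOne g
theorem emitB_head (g rest : List String) :
    emitB (g ++ rest) (0, g.length) = snipOne g := by
  unfold emitB snipOne
  simp only [Nat.sub_zero, List.drop_zero]
  by_cases h : g.length ≤ 9
  · rw [if_pos h, if_pos (by omega), List.take_append,
        show g.length - g.length = 0 by omega, List.take_zero, List.append_nil,
        List.take_of_length_le (le_refl _)]
  · rw [if_neg h, if_neg (by omega)]
    have hg0 : (g ++ rest).getD 0 "" = g.headD "" := by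
      cases g with
      | nil => simp at h
      | cons a t => rfl
    have ht3 : (g ++ rest).take 3 = g.take 3 := by
      rw [List.take_append, show 3 - g.length = 0 by omega, List.take_zero, List.append_nil]
    have hlen3 : (g.drop (g.length - 3)).length = 3 := by simp; omega
    have hd3 : ((g ++ rest).drop (g.length - 3)).take 3 = g.drop (g.length - 3) := by
      rw [List.drop_append, show g.length - 3 - g.length = 0 by omega, List.drop_zero,
          List.take_append, hlen3, show 3 - 3 = 0 by omega, List.take_zero, List.append_nil,
          List.take_of_length_le (by omega : (g.drop (g.length - 3)).length ≤ 3)]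
    rw [hg0, ht3, hd3]

-- B computes flatMap snipOne over the runs
theorem b_eq_runs (diff : List String) :
    compressDiff_alt diff = (runs diff).flatMap snipOne := by
  generalize hn : diff.length = n
  induction n using Nat.strong_induction_on generalizing diff with
  | _ n ih =>
    cases diff with
    | nil => simp [compressDiff_alt, boundsB, runs]
    | cons x xs =>
      set g : List String := x :: xs.takeWhile (fun y => keyOf y == keyOf x) with hgdef
      set rest : List String := xs.dropWhile (fun y => keyOf y == keyOf x) with hrdef
      have hsplit : x :: xs = g ++ rest := by
        simp [hgdef, hrdef]
      have hkey : ∀ y ∈ g, keyOf y = keyOf (g.headD "") := by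
        intro y hy
        simpa [hgdef] using key_of_headRun x xs y (by simpa [hgdef] using hy)
      have hbd : ∀ h t, rest = h :: t → ¬ keyOf h = keyOf (g.headD "") := by
        intro h t hht
        simpa [hgdef] using dropWhile_head_key x xs h t (by simpa [hrdef] using hht)
      have hruns : runs (x :: xs) = g :: runs rest := runs_cons_decomp x xs
      have hrl : rest.length < n := by
        have h1 : rest.length ≤ xs.length := by
          simpa [hrdef] using List.length_dropWhile_le (fun y => keyOf y == keyOf x) xs
        simp [← hn]; omega
      obtain ⟨t, hb⟩ := boundsB_head rest
      have hbfull : boundsB (x :: xs) = 0 :: g.length :: t.map (· + g.length) := by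
        rw [hsplit, boundsB_decomp g rest (by simp [hgdef]) hkey hbd, hb]
        simp
      have hIH : compressDiff_alt rest = (runs rest).flatMap snipOne :=
        ih rest.length hrl rest rfl
      have haltrest : compressDiff_alt rest = ((0 :: t).zip t).flatMap (emitB rest) := by
        unfold compressDiff_alt
        rw [hb]
        rfl
      unfold compressDiff_alt
      rw [hbfull]
      simp only [List.tail_cons, List.zip_cons_cons, List.flatMap_cons]
      have hzip : ((g.length :: t.map (· + g.length)).zip (t.map (· + g.length)))
          = (((0 :: t).zip t).map (fun p => (p.1 + g.length, p.2 + g.length))) := by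
        have : (g.length :: t.map (· + g.length)) = (0 :: t).map (· + g.length) := by simp
        rw [this, List.zip_map]
        rfl
      rw [hzip, List.flatMap_map]
      have hflat : ((0 :: t).zip t).flatMap
            (fun p => emitB (x :: xs) (p.1 + g.length, p.2 + g.length))
          = ((0 :: t).zip t).flatMap (emitB rest) := by
        apply List.flatMap_congr
        intro p _
        rw [hsplit]
        exact emitB_shift g rest p.1 p.2
      have hhead : emitB (x :: xs) (0, g.length) = snipOne g := by
        rw [hsplit]; exact emitB_head g rest
      rw [hflat, hhead, ← haltrest, hIH, hruns, List.flatMap_cons]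

-- ===== VERDICT (by name: the statement is the Claim_ definition above) =====
theorem compressDiff_spec : Claim_equal_compressDiff := by
  intro diff _ _
  unfold Spec_compressDiff
  rw [a_eq_runs, b_eq_runs]
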